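-- pv_equiv track=rewrite | github.com/jingyuanchenxyz/econ199 | m130.py | count_distinct_lines
-- ===== SOURCE A (Python) =====
-- def normalize_coefficients(a, b, c, q):
--     """ Normalize line coefficients to the smallest equivalent form under field properties. """
--     if a == 0 and b == 0:
--         return None  # not good line
--     if a == 0:
--         # vertical line, normalize by 'b'
--         inv = pow(b, q-2, q)  # multiplicative inverse modulo q
--         return (0, 1, (c * inv) % q)
--     # normalize by 'a'
--     inv = pow(a, q-2, q)
--     return (1, (b * inv) % q, (c * inv) % q)
--
-- def count_distinct_lines(q):
--     lines = set()
--     for a in range(q):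
--         for b in range(q):
--             for c in range(q):
--                 if a == 0 and b == 0:
--                     continue  # skip invalid line
--                 norm_line = normalize_coefficients(a, b, c, q)
--                 if norm_line:
--                     lines.add(norm_line)
--     return len(lines)
-- ===== SOURCE B (Python) =====
-- def count_distinct_lines(q):
--     # Every normalized line is either (1, b, c) or (0, 1, c) with b, c in
--     # range(q), and taking a = 1 (resp. a = 0, b = 1) shows each such triple
--     # actually occurs: q*q non-vertical forms plus q vertical ones.
--     return q * q + q if q >= 2 else 0
-- ===== Notes on version B (the rewrite author's own statement) =====
-- stated objective: faster
-- what changed: Replaces the triple loop over all q^3 coefficient triples (with modular-inverse normalization and a set) by the closed form q*q + q: every normalized triple is of the shape (1,b,c) or (0,1,c) with b,c in range(q), and a=1 (resp. a=0,b=1) realizes each of them.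
import Mathlib
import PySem

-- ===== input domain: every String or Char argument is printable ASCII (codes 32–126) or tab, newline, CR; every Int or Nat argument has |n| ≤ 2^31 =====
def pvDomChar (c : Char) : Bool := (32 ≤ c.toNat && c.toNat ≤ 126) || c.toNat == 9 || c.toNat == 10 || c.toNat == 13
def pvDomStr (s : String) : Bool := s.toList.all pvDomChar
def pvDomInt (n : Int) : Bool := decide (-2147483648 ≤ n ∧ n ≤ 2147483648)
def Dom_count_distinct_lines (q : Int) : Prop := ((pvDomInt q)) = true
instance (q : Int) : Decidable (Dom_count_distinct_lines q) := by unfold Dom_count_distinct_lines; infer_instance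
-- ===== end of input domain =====

-- B replaces A's O(q^3) set-building enumeration by the closed form q*q + q (objective: faster).

-- ===== PORT A =====
-- normalize_coefficients(a, b, c, q); pow(x, q-2, q) is PySem.Int.powMod (exponent q-2 ≥ 0 whenever this code is reached)
def pyNormalize (a b c q : Int) : Option (Int × Int × Int) :=
  if a = 0 ∧ b = 0 then none
  else if a = 0 then
    let inv := PySem.Int.powMod b (q - 2).toNat q
    some (0, 1, PySem.Int.mod (c * inv) q)
  else
    let inv := PySem.Int.powMod a (q - 2).toNat q
    some (1, PySem.Int.mod (b * inv) q, PySem.Int.mod (c * inv) q)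

-- Python's 'lines' set is ported as Std.HashSet: A only consumes its SIZE, which does not
-- depend on any set-iteration order, so this is exact (the list-backed PySem.Set would make
-- the quadratic-size membership scans of this O(q^3)-insert loop unevaluable at modest q).

-- innermost 'for c in range(q)' with the 'a == 0 and b == 0: continue' guard and the conditional add
def innerLoopA (q a b : Int) (s : Std.HashSet (Int × Int × Int)) : Std.HashSet (Int × Int × Int) :=
  (PySem.List.pyRange 0 q 1).foldl (fun s c =>
    if a = 0 ∧ b = 0 then s
    else match pyNormalize a b c q with
      | some t => s.insert t
      | none => s) s

-- 'for b in range(q)'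
def midLoopA (q a : Int) (s : Std.HashSet (Int × Int × Int)) : Std.HashSet (Int × Int × Int) :=
  (PySem.List.pyRange 0 q 1).foldl (fun s b => innerLoopA q a b s) s

def count_distinct_lines (q : Int) : Int :=
  (((PySem.List.pyRange 0 q 1).foldl (fun s a => midLoopA q a s)
    (∅ : Std.HashSet (Int × Int × Int))).size : Int)

-- ===== PORT B =====
def count_distinct_lines_alt (q : Int) : Int :=
  if q ≥ 2 then q * q + q else 0

-- ===== PRECONDITION & SPEC =====
def Spec_count_distinct_lines (q : Int) (out : Int) : Prop := out = count_distinct_lines_alt q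
instance (q : Int) (out : Int) : Decidable (Spec_count_distinct_lines q out) := by unfold Spec_count_distinct_lines; infer_instance

-- ===== CLAIM =====
def Claim_equal_count_distinct_lines : Prop := ∀ (q : Int), Dom_count_distinct_lines q → Spec_count_distinct_lines q (count_distinct_lines q)

-- ===== LEMMAS AND PROOFS =====

-- the value normalize_coefficients returns on a valid line
def nvA (a b c q : Int) : Int × Int × Int :=
  if a = 0 then (0, 1, PySem.Int.mod (c * PySem.Int.powMod b (q - 2).toNat q) q)
  else (1, PySem.Int.mod (b * PySem.Int.powMod a (q - 2).toNat q) q,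
           PySem.Int.mod (c * PySem.Int.powMod a (q - 2).toNat q) q)

lemma pyNormalize_eq_some (a b c q : Int) (h : ¬(a = 0 ∧ b = 0)) :
    pyNormalize a b c q = some (nvA a b c q) := by
  unfold pyNormalize nvA
  split_ifs with h1 <;> simp_all

-- ghost PySem.Set mirrors of A's three loops, used only to reason about the HashSet
def innerLoopS (q a b : Int) (s : PySem.Set (Int × Int × Int)) : PySem.Set (Int × Int × Int) :=
  (PySem.List.pyRange 0 q 1).foldl (fun s c =>
    if a = 0 ∧ b = 0 then s
    else match pyNormalize a b c q with
      | some t => PySem.Set.add s t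
      | none => s) s

def midLoopS (q a : Int) (s : PySem.Set (Int × Int × Int)) : PySem.Set (Int × Int × Int) :=
  (PySem.List.pyRange 0 q 1).foldl (fun s b => innerLoopS q a b s) s

def linesA (q : Int) : PySem.Set (Int × Int × Int) :=
  (PySem.List.pyRange 0 q 1).foldl (fun s a => midLoopS q a s) PySem.Set.empty

-- the invariant tying the HashSet state to its PySem.Set mirror
def InvHS (H : Std.HashSet (Int × Int × Int)) (S : PySem.Set (Int × Int × Int)) : Prop :=
  (∀ x, x ∈ H ↔ x ∈ S) ∧ H.size = S.length

lemma invHS_insert (H : Std.HashSet (Int × Int × Int)) (S : PySem.Set (Int × Int × Int))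
    (h : InvHS H S) (t : Int × Int × Int) : InvHS (H.insert t) (PySem.Set.add S t) := by
  obtain ⟨hm, hs⟩ := h
  constructor
  · intro x
    rw [Std.HashSet.mem_insert, PySem.Set.mem_add, hm, beq_iff_eq]
    tauto
  · rw [Std.HashSet.size_insert, PySem.Set.add_eq_ite]
    by_cases ht : t ∈ S
    · rw [if_pos ((hm t).mpr ht), if_pos ht, hs]
    · rw [if_neg (fun h => ht ((hm t).mp h)), if_neg ht, List.length_append,
        List.length_singleton, hs]

lemma invHS_foldl {β : Type} (l : List β)
    (FH : β → Std.HashSet (Int × Int × Int) → Std.HashSet (Int × Int × Int))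
    (FS : β → PySem.Set (Int × Int × Int) → PySem.Set (Int × Int × Int))
    (hF : ∀ b H S, InvHS H S → InvHS (FH b H) (FS b S)) :
    ∀ H S, InvHS H S → InvHS (l.foldl (fun s b => FH b s) H) (l.foldl (fun s b => FS b s) S) := by
  induction l with
  | nil => intro H S h; simpa
  | cons hd tl ih => intro H S h; exact ih _ _ (hF hd H S h)

lemma invHS_innerLoop (q a b : Int) (H : Std.HashSet (Int × Int × Int))
    (S : PySem.Set (Int × Int × Int)) (h : InvHS H S) :
    InvHS (innerLoopA q a b H) (innerLoopS q a b S) := by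
  unfold innerLoopA innerLoopS
  refine invHS_foldl _ _ _ (fun c H S h => ?_) H S h
  dsimp only
  split
  · exact h
  · split
    · exact invHS_insert _ _ h _
    · exact h

lemma count_distinct_lines_eq_len (q : Int) :
    count_distinct_lines q = (linesA q).length := by
  have h := invHS_foldl (PySem.List.pyRange 0 q 1) (fun a s => midLoopA q a s)
    (fun a s => midLoopS q a s)
    (by
      intro a H S h
      unfold midLoopA midLoopS
      exact invHS_foldl _ _ _ (fun b H S h => invHS_innerLoop q a b H S h) H S h)
    (∅ : Std.HashSet (Int × Int × Int)) PySem.Set.empty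
    ⟨by
      intro x
      simp [Std.HashSet.not_mem_empty, PySem.Set.empty], by
      simp [Std.HashSet.size_empty, PySem.Set.empty]⟩
  unfold count_distinct_lines linesA
  rw [h.2]

-- generic membership / nodup transport through a foldl whose step is set-like
lemma mem_foldl_of_mem_iff {α β : Type} [BEq α] (l : List β)
    (F : β → PySem.Set α → PySem.Set α) (P : β → α → Prop)
    (hF : ∀ b s y, y ∈ F b s ↔ y ∈ s ∨ P b y) (s : PySem.Set α) (y : α) :
    y ∈ l.foldl (fun s b => F b s) s ↔ y ∈ s ∨ ∃ b ∈ l, P b y := by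
  induction l generalizing s with
  | nil => simp
  | cons hd tl ih =>
    simp only [List.foldl_cons, ih, hF, List.mem_cons]
    constructor
    · rintro ((h | h) | ⟨b, hb, h⟩)
      · exact Or.inl h
      · exact Or.inr ⟨hd, Or.inl rfl, h⟩
      · exact Or.inr ⟨b, Or.inr hb, h⟩
    · rintro (h | ⟨b, rfl | hb, h⟩)
      · exact Or.inl (Or.inl h)
      · exact Or.inl (Or.inr h)
      · exact Or.inr ⟨b, hb, h⟩

lemma nodup_foldl_of_pres {α β : Type} [BEq α] (l : List β)
    (F : β → PySem.Set α → PySem.Set α)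
    (hF : ∀ b s, List.Nodup s → List.Nodup (F b s)) :
    ∀ s : PySem.Set α, List.Nodup s → List.Nodup (l.foldl (fun s b => F b s) s) := by
  induction l with
  | nil => intro s hs; simpa
  | cons hd tl ih => intro s hs; exact ih _ (hF hd s hs)

lemma mem_innerLoopS (q a b : Int) (s : PySem.Set (Int × Int × Int)) (y : Int × Int × Int) :
    y ∈ innerLoopS q a b s ↔
      y ∈ s ∨ (¬(a = 0 ∧ b = 0) ∧ ∃ c ∈ PySem.List.pyRange 0 q 1, y = nvA a b c q) := by
  unfold innerLoopS
  by_cases h : a = 0 ∧ b = 0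
  · simp [h]
  · have hcongr := PySem.List.foldl_congr_mem (PySem.List.pyRange 0 q 1)
      (fun s c =>
        if a = 0 ∧ b = 0 then s
        else
          match pyNormalize a b c q with
          | some t => PySem.Set.add s t
          | none => s)
      (fun s c => PySem.Set.add s (nvA a b c q)) s
      (by intro acc c _; simp [h, pyNormalize_eq_some a b c q h])
    rw [hcongr, PySem.Set.mem_foldl_add]
    tauto

lemma nodup_innerLoopS (q a b : Int) (s : PySem.Set (Int × Int × Int))
    (hs : List.Nodup s) : List.Nodup (innerLoopS q a b s) := by
  unfold innerLoopS
  refine nodup_foldl_of_pres _ _ (fun c s hnd => ?_) s hs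
  dsimp only
  split
  · exact hnd
  · split
    · exact PySem.Set.nodup_add _ _ hnd
    · exact hnd

lemma mem_linesA (q : Int) (y : Int × Int × Int) :
    y ∈ linesA q ↔ ∃ a ∈ PySem.List.pyRange 0 q 1, ∃ b ∈ PySem.List.pyRange 0 q 1,
      ¬(a = 0 ∧ b = 0) ∧ ∃ c ∈ PySem.List.pyRange 0 q 1, y = nvA a b c q := by
  unfold linesA
  rw [mem_foldl_of_mem_iff _ (fun a s => midLoopS q a s)
    (P := fun a y => ∃ b ∈ PySem.List.pyRange 0 q 1,
      ¬(a = 0 ∧ b = 0) ∧ ∃ c ∈ PySem.List.pyRange 0 q 1, y = nvA a b c q)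
    (by
      intro a s y
      unfold midLoopS
      rw [mem_foldl_of_mem_iff _ (fun b s => innerLoopS q a b s)
        (P := fun b y => ¬(a = 0 ∧ b = 0) ∧ ∃ c ∈ PySem.List.pyRange 0 q 1, y = nvA a b c q)
        (fun b s y => mem_innerLoopS q a b s y)])]
  simp

lemma nodup_linesA (q : Int) : List.Nodup (linesA q) := by
  unfold linesA
  refine nodup_foldl_of_pres _ _ (fun a s hs => ?_) _ List.nodup_nil
  unfold midLoopS
  exact nodup_foldl_of_pres _ _ (fun b s hs => nodup_innerLoopS q a b s hs) _ hs

lemma mem_product' (l1 l2 : List Int) (y : Int × Int) :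
    y ∈ List.product l1 l2 ↔ y.1 ∈ l1 ∧ y.2 ∈ l2 := by
  simp [List.product, Prod.ext_iff]

-- the canonical list of all normalized triples, for counting
def canonB (q : Int) : List (Int × Int × Int) :=
  ((PySem.List.pyRange 0 q 1).product (PySem.List.pyRange 0 q 1)).map
    (fun p => ((1 : Int), p.1, p.2)) ++
  (PySem.List.pyRange 0 q 1).map (fun m => ((0 : Int), (1 : Int), m))

lemma nodup_canonB (q : Int) : List.Nodup (canonB q) := by
  unfold canonB
  refine List.Nodup.append ?_ ?_ ?_
  · exact ((PySem.List.nodup_pyRange_one 0 q).product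
      (PySem.List.nodup_pyRange_one 0 q)).map
      (by intro p p' h; simpa [Prod.ext_iff] using h)
  · exact (PySem.List.nodup_pyRange_one 0 q).map
      (by intro m m' h; simpa [Prod.ext_iff] using h)
  · intro y hy hy'
    simp only [List.mem_map] at hy hy'
    obtain ⟨p, _, rfl⟩ := hy
    obtain ⟨m, _, h⟩ := hy'
    simp [Prod.ext_iff] at h

lemma length_canonB (q : Int) :
    (canonB q).length = q.toNat * q.toNat + q.toNat := by
  simp [canonB, List.product, PySem.List.length_pyRange_one]

lemma powMod_one (q : Int) (n : Nat) (hq : 2 ≤ q) :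
    PySem.Int.powMod 1 n q = 1 := by
  rw [PySem.Int.powMod_eq_emod 1 n (by omega), one_pow]
  exact Int.emod_eq_of_lt (by omega) (by omega)

lemma mem_linesA_iff_mem_canonB (q : Int) (hq2 : 2 ≤ q) (y : Int × Int × Int) :
    y ∈ linesA q ↔ y ∈ canonB q := by
  have hq : 0 < q := by omega
  rw [mem_linesA]
  unfold canonB
  simp only [List.mem_append, List.mem_map]
  constructor
  · rintro ⟨a, ha, b, hb, hg, c, hc, rfl⟩
    rw [PySem.List.mem_pyRange_one] at ha hb hc
    by_cases ha0 : a = 0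
    · subst ha0
      right
      refine ⟨PySem.Int.mod (c * PySem.Int.powMod b (q - 2).toNat q) q, ?_, by simp [nvA]⟩
      rw [PySem.List.mem_pyRange_one, PySem.Int.mod_eq_emod_of_pos hq]
      exact ⟨Int.emod_nonneg _ (by omega), Int.emod_lt_of_pos _ hq⟩
    · left
      refine ⟨(PySem.Int.mod (b * PySem.Int.powMod a (q - 2).toNat q) q,
               PySem.Int.mod (c * PySem.Int.powMod a (q - 2).toNat q) q), ?_, by simp [nvA, ha0]⟩
      rw [mem_product']
      dsimp only
      rw [PySem.List.mem_pyRange_one, PySem.List.mem_pyRange_one,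
        PySem.Int.mod_eq_emod_of_pos hq, PySem.Int.mod_eq_emod_of_pos hq]
      exact ⟨⟨Int.emod_nonneg _ (by omega), Int.emod_lt_of_pos _ hq⟩,
             ⟨Int.emod_nonneg _ (by omega), Int.emod_lt_of_pos _ hq⟩⟩
  · rintro (⟨p, hp, hy⟩ | ⟨m, hm, hy⟩)
    · rw [mem_product', PySem.List.mem_pyRange_one, PySem.List.mem_pyRange_one] at hp
      refine ⟨1, by rw [PySem.List.mem_pyRange_one]; omega,
              p.1, by rw [PySem.List.mem_pyRange_one]; omega,
              by simp, p.2, by rw [PySem.List.mem_pyRange_one]; omega, ?_⟩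
      rw [← hy]
      simp [nvA, powMod_one q _ hq2, PySem.Int.mod_eq_emod_of_pos hq,
        Int.emod_eq_of_lt hp.1.1 hp.1.2, Int.emod_eq_of_lt hp.2.1 hp.2.2]
    · rw [PySem.List.mem_pyRange_one] at hm
      refine ⟨0, by rw [PySem.List.mem_pyRange_one]; omega,
              1, by rw [PySem.List.mem_pyRange_one]; omega,
              by simp, m, by rw [PySem.List.mem_pyRange_one]; omega, ?_⟩
      rw [← hy]
      simp [nvA, powMod_one q _ hq2, PySem.Int.mod_eq_emod_of_pos hq,
        Int.emod_eq_of_lt hm.1 hm.2]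

-- ===== VERDICT =====
theorem count_distinct_lines_spec : Claim_equal_count_distinct_lines := by
  intro q _
  unfold Spec_count_distinct_lines count_distinct_lines_alt
  by_cases hq : q ≥ 2
  · have hperm : (linesA q).Perm (canonB q) :=
      (List.perm_ext_iff_of_nodup (nodup_linesA q) (nodup_canonB q)).mpr
        (fun y => mem_linesA_iff_mem_canonB q hq y)
    rw [count_distinct_lines_eq_len, hperm.length_eq, length_canonB, if_pos hq]
    have h0 : (q.toNat : Int) = q := Int.toNat_of_nonneg (by omega)
    push_cast
    rw [h0]
  · rw [count_distinct_lines_eq_len, if_neg hq]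
    have hempty : linesA q = [] := by
      rw [List.eq_nil_iff_forall_not_mem]
      intro y hy
      rw [mem_linesA] at hy
      obtain ⟨a, ha, b, hb, hguard, -⟩ := hy
      rw [PySem.List.mem_pyRange_one] at ha hb
      exact hguard ⟨by omega, by omega⟩
    rw [hempty]
    simp
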